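-- pv_equiv track=rewrite | github.com/rahmandayub/quran-rag-system | scripts/data_processing.py | get_juz_number
-- ===== SOURCE A (Python) =====
-- def get_juz_number(surah: int, verse: int) -> int:
--     """
--     Calculate juz number based on surah and verse number.
--
--     Uses standard juz boundaries based on common Quran divisions.
--
--     Args:
--         surah: Surah number (1-114)
--         verse: Verse number within surah
--
--     Returns:
--         Juz number (1-30)
--     """
--     # Juz boundaries: (surah, verse) where each juz starts
--     # Based on standard Hafs Quran divisions
--     juz_boundaries = [
--         (1, 1),     # Juz 1: Al-Fatihah
--         (2, 142),   # Juz 2: Al-Baqarah 142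
--         (2, 253),   # Juz 3: Al-Baqarah 253
--         (3, 93),    # Juz 4: Ali 'Imran 93
--         (4, 24),    # Juz 5: An-Nisa 24
--         (4, 148),   # Juz 6: An-Nisa 148
--         (5, 82),    # Juz 7: Al-Ma'idah 82
--         (6, 111),   # Juz 8: Al-An'am 111
--         (7, 88),    # Juz 9: Al-A'raf 88
--         (8, 41),    # Juz 10: Al-Anfal 41
--         (9, 93),    # Juz 11: At-Tawbah 93
--         (11, 6),    # Juz 12: Hud 6
--         (12, 53),   # Juz 13: Yusuf 53
--         (13, 19),   # Juz 14: Ar-Ra'd 19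
--         (15, 1),    # Juz 15: Al-Hijr 1
--         (16, 129),  # Juz 16: An-Nahl 129
--         (17, 1),    # Juz 17: Al-Isra 1
--         (18, 75),   # Juz 18: Al-Kahf 75
--         (21, 1),    # Juz 19: Al-Anbiya 1
--         (22, 79),   # Juz 20: Al-Hajj 79
--         (25, 21),   # Juz 21: Al-Furqan 21
--         (27, 56),   # Juz 22: An-Naml 56
--         (29, 45),   # Juz 23: Al-'Ankabut 45
--         (33, 31),   # Juz 24: Al-Ahzab 31
--         (36, 28),   # Juz 25: Ya-Sin 28
--         (39, 32),   # Juz 26: Az-Zumar 32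
--         (41, 47),   # Juz 27: Fussilat 47
--         (48, 1),    # Juz 28: Al-Fath 1
--         (51, 31),   # Juz 29: Adh-Dhariyat 31
--         (67, 1),    # Juz 30: Al-Mulk 1
--     ]
--
--     # Find the juz by checking boundaries
--     juz = 1
--     for i, (boundary_surah, boundary_verse) in enumerate(juz_boundaries):
--         if surah > boundary_surah or (surah == boundary_surah and verse >= boundary_verse):
--             juz = i + 1
--
--     return juz
-- ===== SOURCE B (Python) =====
-- _JUZ_BOUNDARIES = [
--     (1, 1), (2, 142), (2, 253), (3, 93), (4, 24), (4, 148), (5, 82),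
--     (6, 111), (7, 88), (8, 41), (9, 93), (11, 6), (12, 53), (13, 19),
--     (15, 1), (16, 129), (17, 1), (18, 75), (21, 1), (22, 79), (25, 21),
--     (27, 56), (29, 45), (33, 31), (36, 28), (39, 32), (41, 47), (48, 1),
--     (51, 31), (67, 1),
-- ]
--
--
-- def get_juz_number(surah: int, verse: int) -> int:
--     # Binary search (bisect_right) over the sorted boundary list:
--     # the juz is the number of boundaries <= (surah, verse), clamped to >= 1.
--     key = (surah, verse)
--     lo, hi = 0, len(_JUZ_BOUNDARIES)
--     while lo < hi:
--         mid = (lo + hi) // 2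
--         if key < _JUZ_BOUNDARIES[mid]:
--             hi = mid
--         else:
--             lo = mid + 1
--     return max(1, lo)
-- ===== Notes on version B (the rewrite author's own statement) =====
-- stated objective: alternative
-- what changed: Replaces the full linear scan over all 30 juz boundaries with a hand-rolled bisect_right binary search on the sorted boundary list (the loop condition is exactly lexicographic tuple order), clamped with max(1, .) for inputs before the first boundary.
import Mathlib
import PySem

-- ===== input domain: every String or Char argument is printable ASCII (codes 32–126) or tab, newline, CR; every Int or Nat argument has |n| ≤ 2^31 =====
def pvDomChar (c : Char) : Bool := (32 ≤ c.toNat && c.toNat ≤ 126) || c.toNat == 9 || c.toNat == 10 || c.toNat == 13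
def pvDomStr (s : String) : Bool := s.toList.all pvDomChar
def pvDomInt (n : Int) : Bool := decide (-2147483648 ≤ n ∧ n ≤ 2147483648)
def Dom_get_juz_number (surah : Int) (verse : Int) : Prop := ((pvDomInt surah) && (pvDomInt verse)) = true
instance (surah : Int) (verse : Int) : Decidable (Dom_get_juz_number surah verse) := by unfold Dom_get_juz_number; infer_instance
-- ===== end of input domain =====

-- B replaces A's linear scan over all 30 juz boundaries by a bisect_right binary
-- search on the same sorted boundary list (clamped to ≥ 1); same return value, proved equal.

-- the shared 30-element boundary table (module constant in B, local list in A)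
def pvJuzBoundaries : List (Int × Int) :=
  [(1, 1), (2, 142), (2, 253), (3, 93), (4, 24), (4, 148), (5, 82),
   (6, 111), (7, 88), (8, 41), (9, 93), (11, 6), (12, 53), (13, 19),
   (15, 1), (16, 129), (17, 1), (18, 75), (21, 1), (22, 79), (25, 21),
   (27, 56), (29, 45), (33, 31), (36, 28), (39, 32), (41, 47), (48, 1),
   (51, 31), (67, 1)]

-- ===== PORT A =====
-- the enumerate-for-loop of A: i is the enumerate index, juz the running result
def pvALoop (surah verse : Int) : List (Int × Int) → Int → Int → Int
  | [], _, juz => juz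
  | b :: t, i, juz =>
      pvALoop surah verse t (i + 1)
        (if surah > b.1 ∨ (surah = b.1 ∧ verse ≥ b.2) then i + 1 else juz)

def get_juz_number (surah : Int) (verse : Int) : Int :=
  pvALoop surah verse pvJuzBoundaries 0 1

-- ===== PORT B =====
-- hand-rolled bisect_right while-loop; the `none` branch is an unreachable
-- totality guard (mid is always in range when lo < hi ≤ length)
def pvBisectRight (a : List (Int × Int)) (key : Int × Int) : Nat → Nat → Nat → Nat
  | 0, lo, _ => lo
  | f + 1, lo, hi =>
    if lo < hi then
      match a[(lo + hi) / 2]? with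
      | some b =>
          if key.1 < b.1 ∨ (key.1 = b.1 ∧ key.2 < b.2) then
            pvBisectRight a key f lo ((lo + hi) / 2)
          else
            pvBisectRight a key f ((lo + hi) / 2 + 1) hi
      | none => lo
    else lo

def get_juz_number_alt (surah : Int) (verse : Int) : Int :=
  max 1 ((pvBisectRight pvJuzBoundaries (surah, verse) pvJuzBoundaries.length 0 pvJuzBoundaries.length : Nat) : Int)

-- ===== PRECONDITION & SPEC =====
def Spec_get_juz_number (surah : Int) (verse : Int) (out : Int) : Prop := out = get_juz_number_alt surah verse
instance (surah : Int) (verse : Int) (out : Int) : Decidable (Spec_get_juz_number surah verse out) := by unfold Spec_get_juz_number; infer_instance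

-- ===== CLAIM (what is proved, stated in full; the proofs are below) =====
def Claim_equal_get_juz_number : Prop := ∀ (surah : Int) (verse : Int), Dom_get_juz_number surah verse → Spec_get_juz_number surah verse (get_juz_number surah verse)

-- ===== LEMMAS AND PROOFS =====

-- index characterization: for a list pairwise-monotone w.r.t. Q, Q holds at
-- index j exactly when j < countP Q
theorem pvCountChar (Q : Int × Int → Prop) [DecidablePred Q]
    (l : List (Int × Int)) (hp : List.Pairwise (fun a b => Q b → Q a) l) :
    ∀ (j : Nat) (b : Int × Int), l[j]? = some b →
      (Q b ↔ j < l.countP (fun x => decide (Q x))) := by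
  induction l with
  | nil => intro j b hj; simp at hj
  | cons c t ih =>
    rcases List.pairwise_cons.mp hp with ⟨hc, ht⟩
    intro j b hj
    by_cases hQc : Q c
    · cases j with
      | zero =>
        simp at hj; subst hj
        simp [List.countP_cons, hQc]
      | succ n =>
        simp at hj
        have h := ih ht n b hj
        simp only [List.countP_cons, hQc]
        rw [h]; simp
    · have hct : t.countP (fun x => decide (Q x)) = 0 := by
        rw [List.countP_eq_zero]
        intro y hy
        simp only [decide_eq_true_eq]
        exact fun h => hQc (hc y hy h)
      cases j with
      | zero =>
        simp at hj; subst hj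
        simp [List.countP_cons, hQc, hct]
      | succ n =>
        simp at hj
        have h := ih ht n b hj
        simp only [List.countP_cons, hQc, hct] at h ⊢
        simp at h ⊢
        exact h

-- A's loop returns k (the boundary count ≤ (surah,verse)) when i starts below k, else juz
theorem pvALoop_eq (s v : Int) (k : Nat) :
    ∀ (l : List (Int × Int)) (i juz : Int),
      (∀ (j : Nat) (b : Int × Int), l[j]? = some b →
        ((s > b.1 ∨ (s = b.1 ∧ v ≥ b.2)) ↔ i + (j : Int) < (k : Int))) →
      ((k : Int) ≤ i + l.length ∨ (k : Int) ≤ i) →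
      pvALoop s v l i juz = if i < (k : Int) then (k : Int) else juz := by
  intro l
  induction l with
  | nil =>
    intro i juz _ hub
    simp at hub
    rw [pvALoop, if_neg (by omega)]
  | cons b t ih =>
    intro i juz hchar hub
    have hb := hchar 0 b (by simp)
    simp at hb
    rw [pvALoop]
    rw [ih (i + 1) _ ?_ ?_]
    · by_cases hc : s > b.1 ∨ (s = b.1 ∧ v ≥ b.2)
      · rw [if_pos hc]
        have : i < (k : Int) := by omega
        split_ifs <;> omega
      · rw [if_neg hc]
        have : ¬ i < (k : Int) := by omega
        split_ifs <;> omega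
    · intro j b' hj
      have := hchar (j + 1) b' (by simpa using hj)
      rw [this]; push_cast; omega
    · simp at hub ⊢; omega

-- binary search returns k whenever k is characterized by the index property
theorem pvBR_eq (a : List (Int × Int)) (key : Int × Int) (k : Nat)
    (hchar : ∀ (j : Nat) (b : Int × Int), a[j]? = some b →
      ((key.1 > b.1 ∨ (key.1 = b.1 ∧ key.2 ≥ b.2)) ↔ j < k)) :
    ∀ (f lo hi : Nat), hi - lo ≤ f → lo ≤ k → k ≤ hi → hi ≤ a.length →
      pvBisectRight a key f lo hi = k := by
  intro f
  induction f with
  | zero => intro lo hi hf h1 h2 h3; rw [pvBisectRight]; omega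
  | succ f ih =>
    intro lo hi hf h1 h2 h3
    rw [pvBisectRight]
    by_cases h : lo < hi
    · rw [if_pos h]
      have hmid : (lo + hi) / 2 < a.length := by omega
      have hget : a[(lo + hi) / 2]? = some (a[(lo + hi) / 2]) :=
        List.getElem?_eq_getElem hmid
      rw [hget]
      have hiff := hchar ((lo + hi) / 2) _ hget
      dsimp only
      by_cases hc : key.1 < (a[(lo + hi) / 2]).1 ∨
          (key.1 = (a[(lo + hi) / 2]).1 ∧ key.2 < (a[(lo + hi) / 2]).2)
      · rw [if_pos hc]
        exact ih lo ((lo + hi) / 2) (by omega) h1 (by omega) (by omega)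
      · rw [if_neg hc]
        exact ih ((lo + hi) / 2 + 1) hi (by omega) (by omega) h2 h3
    · rw [if_neg h]; omega

-- strict lexicographic sortedness of the concrete boundary table
theorem pvJuz_pairwise :
    List.Pairwise (fun a b : Int × Int => a.1 < b.1 ∨ (a.1 = b.1 ∧ a.2 < b.2))
      pvJuzBoundaries := by decide

-- ===== VERDICT (by name: the statement is the Claim_ definition above) =====
theorem get_juz_number_spec : Claim_equal_get_juz_number := by
  intro s v _
  unfold Spec_get_juz_number get_juz_number get_juz_number_alt
  have hp : List.Pairwise
      (fun a b : Int × Int => (s > b.1 ∨ (s = b.1 ∧ v ≥ b.2)) → (s > a.1 ∨ (s = a.1 ∧ v ≥ a.2)))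
      pvJuzBoundaries :=
    pvJuz_pairwise.imp (by intro a b hab hb; omega)
  have hchar : ∀ (j : Nat) (b : Int × Int), pvJuzBoundaries[j]? = some b →
      ((s > b.1 ∨ (s = b.1 ∧ v ≥ b.2)) ↔
        j < pvJuzBoundaries.countP (fun x => decide (s > x.1 ∨ (s = x.1 ∧ v ≥ x.2)))) :=
    pvCountChar (fun b => s > b.1 ∨ (s = b.1 ∧ v ≥ b.2)) pvJuzBoundaries hp
  obtain ⟨k, hk⟩ : ∃ k, pvJuzBoundaries.countP
      (fun x => decide (s > x.1 ∨ (s = x.1 ∧ v ≥ x.2))) = k := ⟨_, rfl⟩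
  rw [hk] at hchar
  have hk30 : k ≤ 30 := by
    rw [← hk]
    have := List.countP_le_length (l := pvJuzBoundaries)
      (p := fun x => decide (s > x.1 ∨ (s = x.1 ∧ v ≥ x.2)))
    simpa [pvJuzBoundaries] using this
  have hA : pvALoop s v pvJuzBoundaries 0 1 = if (0:Int) < (k:Int) then (k:Int) else 1 := by
    apply pvALoop_eq s v k
    · intro j b hj
      rw [hchar j b hj]
      constructor <;> (intro; omega)
    · left; simp [pvJuzBoundaries]; omega
  have hB : pvBisectRight pvJuzBoundaries (s, v) pvJuzBoundaries.length 0 pvJuzBoundaries.length = k := by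
    apply pvBR_eq pvJuzBoundaries (s, v) k ?_ pvJuzBoundaries.length 0
      pvJuzBoundaries.length (by omega) (by omega) ?_ le_rfl
    · intro j b hj
      exact hchar j b hj
    · simpa [pvJuzBoundaries] using hk30
  rw [hA, hB]
  rcases Nat.eq_zero_or_pos k with h0 | h0
  · simp [h0]
  · rw [if_pos (by exact_mod_cast h0)]
    omega
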